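-- pv_equiv track=rewrite | github.com/ElPiloto/aoc_2023 | day1/hard_coded/part2.py | find_digit_forward
-- ===== SOURCE A (Python) =====
-- digits = [str(i) for i in range(10)]
--
-- digit_strs = {
--     'one': 1,
--     'two': 2,
--     'three': 3,
--     'four': 4,
--     'five': 5,
--     'six': 6,
--     'seven': 7,
--     'eight': 8,
--     'nine': 9
-- }
--
-- def find_digit_forward(line, pos) -> str | None:
--   if line[pos] in digits:
--     return line[pos]
--   for word, digit in digit_strs.items():
--     end_pos = len(word) + pos
--     if end_pos > len(line):
--       continue
--     if line[pos:end_pos] == word: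
--       return str(digit)
--   return None
-- ===== SOURCE B (Python) =====
-- # Character-level trie (DFA) walk over line[pos:] instead of A's per-word slice
-- # comparisons: the nine digit words are compiled once into a trie and matching
-- # advances one character at a time; correct because no digit word is a prefix
-- # of another, so at most one word can start at a position.
-- digit_strs = {
--     'one': 1,
--     'two': 2,
--     'three': 3,
--     'four': 4,
--     'five': 5,
--     'six': 6,
--     'seven': 7,
--     'eight': 8,
--     'nine': 9
-- }
--
-- _TRIE = {}
-- for _w, _d in digit_strs.items():
--     _node = _TRIE
--     for _ch in _w[:-1]:
--         _node = _node.setdefault(_ch, {})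
--     _node[_w[-1]] = str(_d)
--
-- def find_digit_forward(line, pos) -> str | None:
--   ch = line[pos]
--   if '0' <= ch <= '9':
--     return ch
--   node = _TRIE
--   for c in line[pos:]:
--     node = node.get(c)
--     if node is None:
--       return None
--     if isinstance(node, str):
--       return node
--   return None
-- ===== Notes on version B (the rewrite author's own statement) =====
-- stated objective: alternative
-- what changed: Replaces A's scan over the nine digit words (per-word end-position guard and slice comparison) by a character-level trie/DFA walk over line[pos:], compiled once from digit_strs; exact because no digit word is a prefix of another, so at most one word can start at a position.
-- intended difference: For pos in {-3,-4,-5} with the line ending in a digit word of length exactly -pos, A's slice line[pos:pos+len(word)] becomes the empty slice line[pos:0] so A misses the word and returns None, while B reads the word from line[pos:] and returns its digit, which is the intended forward reading from that position. — e.g. on find_digit_forward("one", -3): A returns none, B returns some "1"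
import Mathlib
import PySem

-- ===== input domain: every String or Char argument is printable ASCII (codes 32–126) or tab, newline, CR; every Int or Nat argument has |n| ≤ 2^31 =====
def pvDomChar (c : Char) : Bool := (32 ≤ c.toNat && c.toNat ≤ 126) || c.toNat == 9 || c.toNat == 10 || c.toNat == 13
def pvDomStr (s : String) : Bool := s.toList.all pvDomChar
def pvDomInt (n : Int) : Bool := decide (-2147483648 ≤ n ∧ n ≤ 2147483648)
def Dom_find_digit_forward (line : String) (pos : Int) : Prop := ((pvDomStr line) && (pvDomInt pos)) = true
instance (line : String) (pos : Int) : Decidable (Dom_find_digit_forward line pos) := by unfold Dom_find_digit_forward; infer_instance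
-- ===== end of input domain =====

-- B replaces A's per-word slice comparisons by a character-level trie (DFA) walk
-- over line[pos:] (objective: alternative algorithm; return value only).

-- ===== PORT A =====
-- digits = [str(i) for i in range(10)]
def pvDigits : List String := (PySem.List.pyRange 0 10 1).map PySem.Int.toStr

-- digit_strs = {'one': 1, ..., 'nine': 9}
def pvDigitStrs : List (String × Int) :=
  [("one", 1), ("two", 2), ("three", 3), ("four", 4), ("five", 5),
   ("six", 6), ("seven", 7), ("eight", 8), ("nine", 9)]

-- the 'for word, digit in digit_strs.items()' loop of A
def pvFindWordA (line : String) (pos : Int) : List (String × Int) → Option String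
  | [] => none
  | (word, digit) :: rest =>
    let end_pos : Int := PySem.Str.len word + pos
    if end_pos > PySem.Str.len line then pvFindWordA line pos rest
    else if PySem.Str.slice line (some pos) (some end_pos) = word then
      some (PySem.Int.toStr digit)
    else pvFindWordA line pos rest

def find_digit_forward (line : String) (pos : Int) : Option String :=
  match PySem.Str.pyGet? line pos with
  | none => none   -- IndexError: excluded by Pre_find_digit_forward
  | some c =>
    if pvDigits.contains (String.ofList [c]) then some (String.ofList [c])
    else pvFindWordA line pos pvDigitStrs

-- ===== PORT B =====
-- the trie _TRIE of Source B (nested dicts of single chars), flattened into a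
-- transition table: state × char ↦ child state (Sum.inl) or final digit string
-- (Sum.inr); exact image of the dict-of-dicts built from digit_strs.
def pvDelta : List ((Nat × Char) × (Nat ⊕ String)) :=
  [((0, 'o'), Sum.inl 1),
   ((1, 'n'), Sum.inl 2),
   ((2, 'e'), Sum.inr "1"),
   ((0, 't'), Sum.inl 3),
   ((3, 'w'), Sum.inl 4),
   ((4, 'o'), Sum.inr "2"),
   ((3, 'h'), Sum.inl 5),
   ((5, 'r'), Sum.inl 6),
   ((6, 'e'), Sum.inl 7),
   ((7, 'e'), Sum.inr "3"),
   ((0, 'f'), Sum.inl 8),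
   ((8, 'o'), Sum.inl 9),
   ((9, 'u'), Sum.inl 10),
   ((10, 'r'), Sum.inr "4"),
   ((8, 'i'), Sum.inl 11),
   ((11, 'v'), Sum.inl 12),
   ((12, 'e'), Sum.inr "5"),
   ((0, 's'), Sum.inl 13),
   ((13, 'i'), Sum.inl 14),
   ((14, 'x'), Sum.inr "6"),
   ((13, 'e'), Sum.inl 15),
   ((15, 'v'), Sum.inl 16),
   ((16, 'e'), Sum.inl 17),
   ((17, 'n'), Sum.inr "7"),
   ((0, 'e'), Sum.inl 18),
   ((18, 'i'), Sum.inl 19),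
   ((19, 'g'), Sum.inl 20),
   ((20, 'h'), Sum.inl 21),
   ((21, 't'), Sum.inr "8"),
   ((0, 'n'), Sum.inl 22),
   ((22, 'i'), Sum.inl 23),
   ((23, 'n'), Sum.inl 24),
   ((24, 'e'), Sum.inr "9")]

-- the 'for c in line[pos:]' walk of Source B: node.get(c) is the table lookup;
-- a str leaf returns, a missing edge returns None, list exhaustion returns None
def pvWalk : Nat → List Char → Option String
  | _, [] => none
  | s, c :: rest =>
    match (pvDelta.find? (fun e => e.1.1 == s && e.1.2 == c)).map Prod.snd with
    | none => none
    | some (Sum.inl s') => pvWalk s' rest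
    | some (Sum.inr d) => some d

def find_digit_forward_alt (line : String) (pos : Int) : Option String :=
  match PySem.Str.pyGet? line pos with
  | none => none   -- IndexError, as in A
  | some ch =>
    if '0' ≤ ch ∧ ch ≤ '9' then some (String.ofList [ch])
    else pvWalk 0 (PySem.Str.slice line (some pos) none).toList

-- ===== PRECONDITION & SPEC =====
-- Pre_ excludes exactly the inputs on which both Pythons raise IndexError on line[pos].
def Pre_find_digit_forward (line : String) (pos : Int) : Prop :=
  PySem.Raise.InRange line.toList.length pos
instance (line : String) (pos : Int) : Decidable (Pre_find_digit_forward line pos) := by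
  unfold Pre_find_digit_forward; infer_instance

def pvWitness_find_digit_forward : String × Int := ("xtwo5", 1)

-- For pos in {-3,-4,-5} with line ending in a digit word of length exactly -pos,
-- A's slice line[pos:pos+len(word)] is the empty slice line[pos:0], so A misses the
-- word and returns None, while B reads the word from line[pos:] and returns its
-- digit — the intended forward reading from that position.
def D_find_digit_forward (line : String) (pos : Int) : Prop :=
  ∃ w ∈ (["one", "two", "three", "four", "five", "six", "seven", "eight", "nine"] : List String),
    pos = -(w.toList.length : Int) ∧ w.toList.isSuffixOf line.toList = true
instance (line : String) (pos : Int) : Decidable (D_find_digit_forward line pos) := by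
  unfold D_find_digit_forward; infer_instance

def Spec_find_digit_forward (line : String) (pos : Int) (out : Option String) : Prop :=
  ¬ D_find_digit_forward line pos → out = find_digit_forward_alt line pos
instance (line : String) (pos : Int) (out : Option String) : Decidable (Spec_find_digit_forward line pos out) := by
  unfold Spec_find_digit_forward; infer_instance

def pvDiffWitness_find_digit_forward : String × Int := ("one", -3)
def pvDiffWitnessOut_find_digit_forward : (Option String) × (Option String) := (none, some "1")

-- ===== CLAIM =====
def Claim_unchanged_find_digit_forward : Prop := ∀ (line : String) (pos : Int), Dom_find_digit_forward line pos → Pre_find_digit_forward line pos → Spec_find_digit_forward line pos (find_digit_forward line pos)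
def Claim_changed_find_digit_forward : Prop := Dom_find_digit_forward (pvDiffWitness_find_digit_forward.1) (pvDiffWitness_find_digit_forward.2) ∧ Pre_find_digit_forward (pvDiffWitness_find_digit_forward.1) (pvDiffWitness_find_digit_forward.2) ∧ D_find_digit_forward (pvDiffWitness_find_digit_forward.1) (pvDiffWitness_find_digit_forward.2) ∧ find_digit_forward (pvDiffWitness_find_digit_forward.1) (pvDiffWitness_find_digit_forward.2) = pvDiffWitnessOut_find_digit_forward.1 ∧ find_digit_forward_alt (pvDiffWitness_find_digit_forward.1) (pvDiffWitness_find_digit_forward.2) = pvDiffWitnessOut_find_digit_forward.2 ∧ pvDiffWitnessOut_find_digit_forward.1 ≠ pvDiffWitnessOut_find_digit_forward.2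
def Claim_exact_find_digit_forward : Prop := ∀ (line : String) (pos : Int), Dom_find_digit_forward line pos → Pre_find_digit_forward line pos → D_find_digit_forward line pos → find_digit_forward line pos ≠ find_digit_forward_alt line pos

-- ===== LEMMAS AND PROOFS =====
theorem walk_eq (t : List Char) :
    pvWalk 0 t = (pvDigitStrs.find? (fun p => p.1.toList.isPrefixOf t)).map (fun p => PySem.Int.toStr p.2) := by
  rcases t with _ | ⟨c1, t⟩
  · decide
  by_cases h1o : c1 = 'o'
  · subst h1o
    rcases t with _ | ⟨c2, t⟩
    · decide
    by_cases h2n : c2 = 'n'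
    · subst h2n
      rcases t with _ | ⟨c3, t⟩
      · decide
      by_cases h3e : c3 = 'e'
      · subst h3e
        simp [pvWalk, pvDelta, pvDigitStrs, List.find?, List.isPrefixOf];
          decide
      simp [pvWalk, pvDelta, pvDigitStrs, List.find?, List.isPrefixOf, beq_false_of_ne (Ne.symm h3e)]
    simp [pvWalk, pvDelta, pvDigitStrs, List.find?, List.isPrefixOf, beq_false_of_ne (Ne.symm h2n)]
  by_cases h1t : c1 = 't'
  · subst h1t
    rcases t with _ | ⟨c2, t⟩
    · decide
    by_cases h2w : c2 = 'w'
    · subst h2w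
      rcases t with _ | ⟨c3, t⟩
      · decide
      by_cases h3o : c3 = 'o'
      · subst h3o
        simp [pvWalk, pvDelta, pvDigitStrs, List.find?, List.isPrefixOf];
          decide
      simp [pvWalk, pvDelta, pvDigitStrs, List.find?, List.isPrefixOf, beq_false_of_ne (Ne.symm h3o)]
    by_cases h2h : c2 = 'h'
    · subst h2h
      rcases t with _ | ⟨c3, t⟩
      · decide
      by_cases h3r : c3 = 'r'
      · subst h3r
        rcases t with _ | ⟨c4, t⟩
        · decide
        by_cases h4e : c4 = 'e'
        · subst h4e
          rcases t with _ | ⟨c5, t⟩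
          · decide
          by_cases h5e : c5 = 'e'
          · subst h5e
            simp [pvWalk, pvDelta, pvDigitStrs, List.find?, List.isPrefixOf];
              decide
          simp [pvWalk, pvDelta, pvDigitStrs, List.find?, List.isPrefixOf, beq_false_of_ne (Ne.symm h5e)]
        simp [pvWalk, pvDelta, pvDigitStrs, List.find?, List.isPrefixOf, beq_false_of_ne (Ne.symm h4e)]
      simp [pvWalk, pvDelta, pvDigitStrs, List.find?, List.isPrefixOf, beq_false_of_ne (Ne.symm h3r)]
    simp [pvWalk, pvDelta, pvDigitStrs, List.find?, List.isPrefixOf, beq_false_of_ne (Ne.symm h2w), beq_false_of_ne (Ne.symm h2h)]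
  by_cases h1f : c1 = 'f'
  · subst h1f
    rcases t with _ | ⟨c2, t⟩
    · decide
    by_cases h2o : c2 = 'o'
    · subst h2o
      rcases t with _ | ⟨c3, t⟩
      · decide
      by_cases h3u : c3 = 'u'
      · subst h3u
        rcases t with _ | ⟨c4, t⟩
        · decide
        by_cases h4r : c4 = 'r'
        · subst h4r
          simp [pvWalk, pvDelta, pvDigitStrs, List.find?, List.isPrefixOf];
            decide
        simp [pvWalk, pvDelta, pvDigitStrs, List.find?, List.isPrefixOf, beq_false_of_ne (Ne.symm h4r)]
      simp [pvWalk, pvDelta, pvDigitStrs, List.find?, List.isPrefixOf, beq_false_of_ne (Ne.symm h3u)]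
    by_cases h2i : c2 = 'i'
    · subst h2i
      rcases t with _ | ⟨c3, t⟩
      · decide
      by_cases h3v : c3 = 'v'
      · subst h3v
        rcases t with _ | ⟨c4, t⟩
        · decide
        by_cases h4e : c4 = 'e'
        · subst h4e
          simp [pvWalk, pvDelta, pvDigitStrs, List.find?, List.isPrefixOf];
            decide
        simp [pvWalk, pvDelta, pvDigitStrs, List.find?, List.isPrefixOf, beq_false_of_ne (Ne.symm h4e)]
      simp [pvWalk, pvDelta, pvDigitStrs, List.find?, List.isPrefixOf, beq_false_of_ne (Ne.symm h3v)]
    simp [pvWalk, pvDelta, pvDigitStrs, List.find?, List.isPrefixOf, beq_false_of_ne (Ne.symm h2o), beq_false_of_ne (Ne.symm h2i)]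
  by_cases h1s : c1 = 's'
  · subst h1s
    rcases t with _ | ⟨c2, t⟩
    · decide
    by_cases h2i : c2 = 'i'
    · subst h2i
      rcases t with _ | ⟨c3, t⟩
      · decide
      by_cases h3x : c3 = 'x'
      · subst h3x
        simp [pvWalk, pvDelta, pvDigitStrs, List.find?, List.isPrefixOf];
          decide
      simp [pvWalk, pvDelta, pvDigitStrs, List.find?, List.isPrefixOf, beq_false_of_ne (Ne.symm h3x)]
    by_cases h2e : c2 = 'e'
    · subst h2e
      rcases t with _ | ⟨c3, t⟩
      · decide
      by_cases h3v : c3 = 'v'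
      · subst h3v
        rcases t with _ | ⟨c4, t⟩
        · decide
        by_cases h4e : c4 = 'e'
        · subst h4e
          rcases t with _ | ⟨c5, t⟩
          · decide
          by_cases h5n : c5 = 'n'
          · subst h5n
            simp [pvWalk, pvDelta, pvDigitStrs, List.find?, List.isPrefixOf];
              decide
          simp [pvWalk, pvDelta, pvDigitStrs, List.find?, List.isPrefixOf, beq_false_of_ne (Ne.symm h5n)]
        simp [pvWalk, pvDelta, pvDigitStrs, List.find?, List.isPrefixOf, beq_false_of_ne (Ne.symm h4e)]
      simp [pvWalk, pvDelta, pvDigitStrs, List.find?, List.isPrefixOf, beq_false_of_ne (Ne.symm h3v)]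
    simp [pvWalk, pvDelta, pvDigitStrs, List.find?, List.isPrefixOf, beq_false_of_ne (Ne.symm h2i), beq_false_of_ne (Ne.symm h2e)]
  by_cases h1e : c1 = 'e'
  · subst h1e
    rcases t with _ | ⟨c2, t⟩
    · decide
    by_cases h2i : c2 = 'i'
    · subst h2i
      rcases t with _ | ⟨c3, t⟩
      · decide
      by_cases h3g : c3 = 'g'
      · subst h3g
        rcases t with _ | ⟨c4, t⟩
        · decide
        by_cases h4h : c4 = 'h'
        · subst h4h
          rcases t with _ | ⟨c5, t⟩
          · decide
          by_cases h5t : c5 = 't'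
          · subst h5t
            simp [pvWalk, pvDelta, pvDigitStrs, List.find?, List.isPrefixOf];
              decide
          simp [pvWalk, pvDelta, pvDigitStrs, List.find?, List.isPrefixOf, beq_false_of_ne (Ne.symm h5t)]
        simp [pvWalk, pvDelta, pvDigitStrs, List.find?, List.isPrefixOf, beq_false_of_ne (Ne.symm h4h)]
      simp [pvWalk, pvDelta, pvDigitStrs, List.find?, List.isPrefixOf, beq_false_of_ne (Ne.symm h3g)]
    simp [pvWalk, pvDelta, pvDigitStrs, List.find?, List.isPrefixOf, beq_false_of_ne (Ne.symm h2i)]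
  by_cases h1n : c1 = 'n'
  · subst h1n
    rcases t with _ | ⟨c2, t⟩
    · decide
    by_cases h2i : c2 = 'i'
    · subst h2i
      rcases t with _ | ⟨c3, t⟩
      · decide
      by_cases h3n : c3 = 'n'
      · subst h3n
        rcases t with _ | ⟨c4, t⟩
        · decide
        by_cases h4e : c4 = 'e'
        · subst h4e
          simp [pvWalk, pvDelta, pvDigitStrs, List.find?, List.isPrefixOf];
            decide
        simp [pvWalk, pvDelta, pvDigitStrs, List.find?, List.isPrefixOf, beq_false_of_ne (Ne.symm h4e)]
      simp [pvWalk, pvDelta, pvDigitStrs, List.find?, List.isPrefixOf, beq_false_of_ne (Ne.symm h3n)]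
    simp [pvWalk, pvDelta, pvDigitStrs, List.find?, List.isPrefixOf, beq_false_of_ne (Ne.symm h2i)]
  simp [pvWalk, pvDelta, pvDigitStrs, List.find?, List.isPrefixOf, beq_false_of_ne (Ne.symm h1o), beq_false_of_ne (Ne.symm h1t), beq_false_of_ne (Ne.symm h1f), beq_false_of_ne (Ne.symm h1s), beq_false_of_ne (Ne.symm h1e), beq_false_of_ne (Ne.symm h1n)]


-- bridge: string-level slice to list-level slice
theorem slice_toList (line : String) (a b : Option Int) :
    (PySem.Str.slice line a b).toList = PySem.List.slice line.toList a b := by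
  simp [PySem.Str.slice, PySem.Chars.slice]

-- A's per-word test (length guard + slice comparison) agrees with "w is a prefix
-- of line[pos:]" except exactly when pos + |w| = 0 and w equals line[pos:].
theorem check_iff (xs w : List Char) (pos : Int) (hw : w ≠ [])
    (hpre : PySem.Raise.InRange xs.length pos)
    (hD : ¬ (((w.length : Int) + pos = 0) ∧ w = PySem.List.slice xs (some pos) none)) :
    ((¬ ((w.length : Int) + pos > (xs.length : Int))) ∧
       PySem.List.slice xs (some pos) (some ((w.length : Int) + pos)) = w)
      ↔ w <+: PySem.List.slice xs (some pos) none := by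
  obtain ⟨h1, h2⟩ := hpre
  have hk : 0 < w.length := List.length_pos_iff.mpr hw
  rw [PySem.List.slice_some_none] at hD ⊢
  rw [List.prefix_iff_eq_take]
  simp only [PySem.List.slice]
  set n := xs.length with hn
  set k := w.length with hkdef
  set j := PySem.List.clampIdx xs.length pos with hjdef
  set m := PySem.List.clampIdx xs.length ((k:Int)+pos) with hmdef
  have hjv : (j:Int) = if pos < 0 then (n:Int)+pos else pos := by
    rw [hjdef]; simp only [PySem.List.clampIdx, ← hn]; split_ifs <;> omega
  have hmv : (m:Int) = if (k:Int)+pos < 0 then (n:Int)+k+pos else min ((k:Int)+pos) (n:Int) := by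
    rw [hmdef]; simp only [PySem.List.clampIdx, ← hn]; split_ifs <;> omega
  have ht : (List.drop j xs).length = n - j := by simp [hn]
  by_cases hgood : ((k:Int) + pos ≤ (n:Int)) ∧ ((k:Int)+pos < 0 ∨ 0 ≤ pos)
  · have hmj : m - j = k := by split_ifs at hjv hmv <;> omega
    rw [hmj]
    constructor
    · rintro ⟨-, hs⟩; exact hs.symm
    · intro hs; exact ⟨by omega, hs.symm⟩
  · by_cases hz : pos < 0 ∧ (k:Int) + pos = 0
    · have hmj : m - j = 0 := by split_ifs at hjv hmv <;> omega
      have htk : (List.drop j xs).length ≤ k := by omega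
      rw [hmj, List.take_of_length_le htk]
      simp only [List.take_zero]
      constructor
      · rintro ⟨-, hs⟩; exact absurd hs.symm hw
      · intro hs; exact absurd ⟨hz.2, hs⟩ hD
    · have htlt : (List.drop j xs).length < k := by split_ifs at hjv hmv <;> omega
      constructor
      · rintro ⟨hg, hs⟩
        have := congrArg List.length hs
        simp only [List.length_take, ht] at this
        split_ifs at hjv hmv <;> omega
      · intro hs
        have := congrArg List.length hs
        simp only [List.length_take, ht, ← hkdef] at this
        omega

-- string-level form of check_iff, matching pvFindWordA's step shape
theorem check_iff_str (line w' : String) (pos : Int) (hw' : w'.toList ≠ [])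
    (hpre : PySem.Raise.InRange line.toList.length pos)
    (hD : ¬ (((w'.toList.length : Int) + pos = 0) ∧
             w'.toList = (PySem.Str.slice line (some pos) none).toList)) :
    ((¬ (PySem.Str.len w' + pos > PySem.Str.len line)) ∧
       PySem.Str.slice line (some pos) (some (PySem.Str.len w' + pos)) = w')
      ↔ w'.toList <+: (PySem.Str.slice line (some pos) none).toList := by
  rw [String.ext_iff]
  simp only [slice_toList] at hD ⊢
  exact check_iff line.toList w'.toList pos hw' hpre hD

theorem findA_eq (line : String) (pos : Int) (lst : List (String × Int))
    (h : ∀ p ∈ lst,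
      ((¬ (PySem.Str.len p.1 + pos > PySem.Str.len line)) ∧
        PySem.Str.slice line (some pos) (some (PySem.Str.len p.1 + pos)) = p.1)
      ↔ p.1.toList <+: (PySem.Str.slice line (some pos) none).toList) :
    pvFindWordA line pos lst =
      (lst.find? (fun p =>
        p.1.toList.isPrefixOf (PySem.Str.slice line (some pos) none).toList)).map
        (fun p => PySem.Int.toStr p.2) := by
  induction lst with
  | nil => rfl
  | cons p rest ih =>
    obtain ⟨w, d⟩ := p
    have hp := h (w, d) (List.mem_cons_self ..)
    have hrest := ih (fun q hq => h q (List.mem_cons_of_mem _ hq))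
    by_cases hpre : w.toList <+: (PySem.Str.slice line (some pos) none).toList
    · obtain ⟨hg, hs⟩ := hp.mpr hpre
      simp only [pvFindWordA]
      rw [if_neg hg, if_pos hs, List.find?_cons_of_pos (by
        simpa [List.isPrefixOf_iff_prefix] using hpre)]
      rfl
    · have hf : List.find? (fun p =>
        p.1.toList.isPrefixOf (PySem.Str.slice line (some pos) none).toList) ((w, d) :: rest) =
          List.find? _ rest := List.find?_cons_of_neg (by
        simpa [List.isPrefixOf_iff_prefix] using hpre)
      rw [hf, ← hrest]
      simp only [pvFindWordA]
      by_cases hg : PySem.Str.len w + pos > PySem.Str.len line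
      · rw [if_pos hg]
      · rw [if_neg hg, if_neg (fun hs => hpre (hp.mp ⟨hg, hs⟩))]

theorem findA_none (line : String) (pos : Int) (lst : List (String × Int))
    (h : ∀ p ∈ lst, ¬ ((¬ (PySem.Str.len p.1 + pos > PySem.Str.len line)) ∧
        PySem.Str.slice line (some pos) (some (PySem.Str.len p.1 + pos)) = p.1)) :
    pvFindWordA line pos lst = none := by
  induction lst with
  | nil => rfl
  | cons p rest ih =>
    obtain ⟨w, d⟩ := p
    have hp := h (w, d) (List.mem_cons_self ..)
    have hrest := ih (fun q hq => h q (List.mem_cons_of_mem _ hq))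
    simp only [pvFindWordA]
    by_cases hg : PySem.Str.len w + pos > PySem.Str.len line
    · rw [if_pos hg]; exact hrest
    · rw [if_neg hg, if_neg (fun hs => hp ⟨hg, hs⟩)]; exact hrest

theorem check_false_zero (line w' : String) (pos : Int) (hw' : w'.toList ≠ [])
    (hzero : PySem.Str.len w' + pos = 0) :
    ¬ ((¬ (PySem.Str.len w' + pos > PySem.Str.len line)) ∧
        PySem.Str.slice line (some pos) (some (PySem.Str.len w' + pos)) = w') := by
  rintro ⟨-, hs⟩
  rw [hzero] at hs
  have h := congrArg String.toList hs
  rw [slice_toList] at h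
  have hnil : PySem.List.slice line.toList (some pos) (some 0) = [] := by
    simp [PySem.List.slice, PySem.List.clampIdx]
  rw [hnil] at h
  exact hw' h.symm

theorem check_false_pre (line w' : String) (pos : Int) (hw' : w'.toList ≠ [])
    (hpre : PySem.Raise.InRange line.toList.length pos)
    (hne : ((w'.toList.length : Int) + pos ≠ 0))
    (hnp : ¬ w'.toList <+: (PySem.Str.slice line (some pos) none).toList) :
    ¬ ((¬ (PySem.Str.len w' + pos > PySem.Str.len line)) ∧
        PySem.Str.slice line (some pos) (some (PySem.Str.len w' + pos)) = w') :=
  fun hc => hnp ((check_iff_str line w' pos hw' hpre (fun hx => hne hx.1)).mp hc)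

theorem lem_char_eq (c d : Char) : c = d ↔ c.toNat = d.toNat := by
  rw [Char.ext_iff, UInt32.ext_iff]; exact Iff.rfl

theorem lem_ofList_eq (c d : Char) : (String.ofList [c] = String.ofList [d]) ↔ c = d := by
  constructor
  · intro h; have := congrArg String.toList h; simpa using this
  · rintro rfl; rfl

theorem lem_digit (c : Char) :
    (pvDigits.contains (String.ofList [c]) = true) ↔ ('0' ≤ c ∧ c ≤ '9') := by
  have hd : pvDigits = [String.ofList ['0'], String.ofList ['1'], String.ofList ['2'],
      String.ofList ['3'], String.ofList ['4'], String.ofList ['5'], String.ofList ['6'],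
      String.ofList ['7'], String.ofList ['8'], String.ofList ['9']] := by decide
  rw [hd, Char.le_def, Char.le_def, UInt32.le_iff_toNat_le, UInt32.le_iff_toNat_le]
  simp only [List.contains_eq_mem, decide_eq_true_eq, List.mem_cons, List.not_mem_nil, or_false,
    lem_ofList_eq, lem_char_eq]
  have e : '0'.toNat = 48 ∧ '1'.toNat = 49 ∧ '2'.toNat = 50 ∧ '3'.toNat = 51 ∧ '4'.toNat = 52 ∧
      '5'.toNat = 53 ∧ '6'.toNat = 54 ∧ '7'.toNat = 55 ∧ '8'.toNat = 56 ∧ '9'.toNat = 57 := by decide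
  obtain ⟨e0, e1, e2, e3, e4, e5, e6, e7, e8, e9⟩ := e
  rw [e0, e1, e2, e3, e4, e5, e6, e7, e8, e9]
  show _ ↔ (48 ≤ c.toNat ∧ c.toNat ≤ 57)
  omega


theorem main_eq (line : String) (pos : Int)
    (hpre : Pre_find_digit_forward line pos)
    (hnD : ¬ D_find_digit_forward line pos) :
    find_digit_forward line pos = find_digit_forward_alt line pos := by
  obtain ⟨c, hc⟩ : ∃ c, PySem.Str.pyGet? line pos = some c := by
    cases h : PySem.Str.pyGet? line pos with
    | some c => exact ⟨c, rfl⟩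
    | none =>
      exact absurd hpre ((PySem.List.pyGet?_eq_none_iff (xs := line.toList) (i := pos)).1
        (by simpa [PySem.Str.pyGet?] using h))
  simp only [find_digit_forward, find_digit_forward_alt, hc]
  by_cases hd : '0' ≤ c ∧ c ≤ '9'
  · have hmem : pvDigits.contains (String.ofList [c]) = true := (lem_digit c).2 hd
    rw [if_pos hmem, if_pos hd]
  · have hmem : ¬ pvDigits.contains (String.ofList [c]) = true := fun h => hd ((lem_digit c).1 h)
    rw [if_neg hmem, if_neg hd]
    rw [walk_eq]
    apply findA_eq
    intro p hp
    apply check_iff_str line p.1 pos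
    · fin_cases hp <;> decide
    · exact hpre
    · rintro ⟨he, hs⟩
      apply hnD
      refine ⟨p.1, ?_, by omega, ?_⟩
      · fin_cases hp <;> decide
      · rw [slice_toList, PySem.List.slice_some_none] at hs
        refine List.isSuffixOf_iff_suffix.mpr ?_
        rw [hs]
        exact List.drop_suffix _ _


theorem main_ne (line : String) (pos : Int)
    (hpre : Pre_find_digit_forward line pos)
    (hD : D_find_digit_forward line pos) :
    find_digit_forward line pos ≠ find_digit_forward_alt line pos := by
  obtain ⟨w, hwmem, hpos, hsuf⟩ := hD
  obtain ⟨s, hs⟩ := List.isSuffixOf_iff_suffix.mp hsuf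
  fin_cases hwmem
  · -- w = "one"
    have hk : pos = -3 := by simpa using hpos
    subst hk
    have hlen : line.toList.length = s.length + 3 := by rw [← hs]; simp
    have hclamp : PySem.List.clampIdx line.toList.length (-3) = s.length := by
      simp only [PySem.List.clampIdx]; split_ifs <;> omega
    have htail : (PySem.Str.slice line (some (-3)) none).toList = "one".toList := by
      rw [slice_toList, PySem.List.slice_some_none, hclamp, ← hs, List.drop_left]
    have hidx : line.toList.length - 3 = s.length := by omega
    have hget : PySem.Str.pyGet? line (-3) = some 'o' := by
      have h0 := PySem.List.pyGet?_neg_natCast line.toList 3 (by omega) (by omega)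
      have hcast : (-((3:Nat):Int)) = (-3 : Int) := by norm_num
      rw [hcast] at h0
      show PySem.List.pyGet? line.toList (-3) = some 'o'
      rw [h0, hidx, ← hs, List.getElem?_append_right (le_refl _)]
      simp
    have hA : find_digit_forward line (-3) = none := by
      simp only [find_digit_forward, hget]
      rw [if_neg (by decide : ¬ (pvDigits.contains (String.ofList ['o']) = true))]
      apply findA_none
      intro p hp
      fin_cases hp
      · exact check_false_zero line "one" (-3) (by decide) (by decide)
      · exact check_false_zero line "two" (-3) (by decide) (by decide)
      · exact check_false_pre line "three" (-3) (by decide) ⟨by omega, by omega⟩ (by decide) (by rw [htail]; decide)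
      · exact check_false_pre line "four" (-3) (by decide) ⟨by omega, by omega⟩ (by decide) (by rw [htail]; decide)
      · exact check_false_pre line "five" (-3) (by decide) ⟨by omega, by omega⟩ (by decide) (by rw [htail]; decide)
      · exact check_false_zero line "six" (-3) (by decide) (by decide)
      · exact check_false_pre line "seven" (-3) (by decide) ⟨by omega, by omega⟩ (by decide) (by rw [htail]; decide)
      · exact check_false_pre line "eight" (-3) (by decide) ⟨by omega, by omega⟩ (by decide) (by rw [htail]; decide)
      · exact check_false_pre line "nine" (-3) (by decide) ⟨by omega, by omega⟩ (by decide) (by rw [htail]; decide)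
    have hB : find_digit_forward_alt line (-3) = some "1" := by
      simp only [find_digit_forward_alt, hget]
      rw [if_neg (by decide), htail]
      decide
    rw [hA, hB]
    simp
  · -- w = "two"
    have hk : pos = -3 := by simpa using hpos
    subst hk
    have hlen : line.toList.length = s.length + 3 := by rw [← hs]; simp
    have hclamp : PySem.List.clampIdx line.toList.length (-3) = s.length := by
      simp only [PySem.List.clampIdx]; split_ifs <;> omega
    have htail : (PySem.Str.slice line (some (-3)) none).toList = "two".toList := by
      rw [slice_toList, PySem.List.slice_some_none, hclamp, ← hs, List.drop_left]
    have hidx : line.toList.length - 3 = s.length := by omega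
    have hget : PySem.Str.pyGet? line (-3) = some 't' := by
      have h0 := PySem.List.pyGet?_neg_natCast line.toList 3 (by omega) (by omega)
      have hcast : (-((3:Nat):Int)) = (-3 : Int) := by norm_num
      rw [hcast] at h0
      show PySem.List.pyGet? line.toList (-3) = some 't'
      rw [h0, hidx, ← hs, List.getElem?_append_right (le_refl _)]
      simp
    have hA : find_digit_forward line (-3) = none := by
      simp only [find_digit_forward, hget]
      rw [if_neg (by decide : ¬ (pvDigits.contains (String.ofList ['t']) = true))]
      apply findA_none
      intro p hp
      fin_cases hp
      · exact check_false_zero line "one" (-3) (by decide) (by decide)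
      · exact check_false_zero line "two" (-3) (by decide) (by decide)
      · exact check_false_pre line "three" (-3) (by decide) ⟨by omega, by omega⟩ (by decide) (by rw [htail]; decide)
      · exact check_false_pre line "four" (-3) (by decide) ⟨by omega, by omega⟩ (by decide) (by rw [htail]; decide)
      · exact check_false_pre line "five" (-3) (by decide) ⟨by omega, by omega⟩ (by decide) (by rw [htail]; decide)
      · exact check_false_zero line "six" (-3) (by decide) (by decide)
      · exact check_false_pre line "seven" (-3) (by decide) ⟨by omega, by omega⟩ (by decide) (by rw [htail]; decide)
      · exact check_false_pre line "eight" (-3) (by decide) ⟨by omega, by omega⟩ (by decide) (by rw [htail]; decide)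
      · exact check_false_pre line "nine" (-3) (by decide) ⟨by omega, by omega⟩ (by decide) (by rw [htail]; decide)
    have hB : find_digit_forward_alt line (-3) = some "2" := by
      simp only [find_digit_forward_alt, hget]
      rw [if_neg (by decide), htail]
      decide
    rw [hA, hB]
    simp
  · -- w = "three"
    have hk : pos = -5 := by simpa using hpos
    subst hk
    have hlen : line.toList.length = s.length + 5 := by rw [← hs]; simp
    have hclamp : PySem.List.clampIdx line.toList.length (-5) = s.length := by
      simp only [PySem.List.clampIdx]; split_ifs <;> omega
    have htail : (PySem.Str.slice line (some (-5)) none).toList = "three".toList := by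
      rw [slice_toList, PySem.List.slice_some_none, hclamp, ← hs, List.drop_left]
    have hidx : line.toList.length - 5 = s.length := by omega
    have hget : PySem.Str.pyGet? line (-5) = some 't' := by
      have h0 := PySem.List.pyGet?_neg_natCast line.toList 5 (by omega) (by omega)
      have hcast : (-((5:Nat):Int)) = (-5 : Int) := by norm_num
      rw [hcast] at h0
      show PySem.List.pyGet? line.toList (-5) = some 't'
      rw [h0, hidx, ← hs, List.getElem?_append_right (le_refl _)]
      simp
    have hA : find_digit_forward line (-5) = none := by
      simp only [find_digit_forward, hget]
      rw [if_neg (by decide : ¬ (pvDigits.contains (String.ofList ['t']) = true))]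
      apply findA_none
      intro p hp
      fin_cases hp
      · exact check_false_pre line "one" (-5) (by decide) ⟨by omega, by omega⟩ (by decide) (by rw [htail]; decide)
      · exact check_false_pre line "two" (-5) (by decide) ⟨by omega, by omega⟩ (by decide) (by rw [htail]; decide)
      · exact check_false_zero line "three" (-5) (by decide) (by decide)
      · exact check_false_pre line "four" (-5) (by decide) ⟨by omega, by omega⟩ (by decide) (by rw [htail]; decide)
      · exact check_false_pre line "five" (-5) (by decide) ⟨by omega, by omega⟩ (by decide) (by rw [htail]; decide)
      · exact check_false_pre line "six" (-5) (by decide) ⟨by omega, by omega⟩ (by decide) (by rw [htail]; decide)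
      · exact check_false_zero line "seven" (-5) (by decide) (by decide)
      · exact check_false_zero line "eight" (-5) (by decide) (by decide)
      · exact check_false_pre line "nine" (-5) (by decide) ⟨by omega, by omega⟩ (by decide) (by rw [htail]; decide)
    have hB : find_digit_forward_alt line (-5) = some "3" := by
      simp only [find_digit_forward_alt, hget]
      rw [if_neg (by decide), htail]
      decide
    rw [hA, hB]
    simp
  · -- w = "four"
    have hk : pos = -4 := by simpa using hpos
    subst hk
    have hlen : line.toList.length = s.length + 4 := by rw [← hs]; simp
    have hclamp : PySem.List.clampIdx line.toList.length (-4) = s.length := by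
      simp only [PySem.List.clampIdx]; split_ifs <;> omega
    have htail : (PySem.Str.slice line (some (-4)) none).toList = "four".toList := by
      rw [slice_toList, PySem.List.slice_some_none, hclamp, ← hs, List.drop_left]
    have hidx : line.toList.length - 4 = s.length := by omega
    have hget : PySem.Str.pyGet? line (-4) = some 'f' := by
      have h0 := PySem.List.pyGet?_neg_natCast line.toList 4 (by omega) (by omega)
      have hcast : (-((4:Nat):Int)) = (-4 : Int) := by norm_num
      rw [hcast] at h0
      show PySem.List.pyGet? line.toList (-4) = some 'f'
      rw [h0, hidx, ← hs, List.getElem?_append_right (le_refl _)]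
      simp
    have hA : find_digit_forward line (-4) = none := by
      simp only [find_digit_forward, hget]
      rw [if_neg (by decide : ¬ (pvDigits.contains (String.ofList ['f']) = true))]
      apply findA_none
      intro p hp
      fin_cases hp
      · exact check_false_pre line "one" (-4) (by decide) ⟨by omega, by omega⟩ (by decide) (by rw [htail]; decide)
      · exact check_false_pre line "two" (-4) (by decide) ⟨by omega, by omega⟩ (by decide) (by rw [htail]; decide)
      · exact check_false_pre line "three" (-4) (by decide) ⟨by omega, by omega⟩ (by decide) (by rw [htail]; decide)
      · exact check_false_zero line "four" (-4) (by decide) (by decide)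
      · exact check_false_zero line "five" (-4) (by decide) (by decide)
      · exact check_false_pre line "six" (-4) (by decide) ⟨by omega, by omega⟩ (by decide) (by rw [htail]; decide)
      · exact check_false_pre line "seven" (-4) (by decide) ⟨by omega, by omega⟩ (by decide) (by rw [htail]; decide)
      · exact check_false_pre line "eight" (-4) (by decide) ⟨by omega, by omega⟩ (by decide) (by rw [htail]; decide)
      · exact check_false_zero line "nine" (-4) (by decide) (by decide)
    have hB : find_digit_forward_alt line (-4) = some "4" := by
      simp only [find_digit_forward_alt, hget]
      rw [if_neg (by decide), htail]
      decide
    rw [hA, hB]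
    simp
  · -- w = "five"
    have hk : pos = -4 := by simpa using hpos
    subst hk
    have hlen : line.toList.length = s.length + 4 := by rw [← hs]; simp
    have hclamp : PySem.List.clampIdx line.toList.length (-4) = s.length := by
      simp only [PySem.List.clampIdx]; split_ifs <;> omega
    have htail : (PySem.Str.slice line (some (-4)) none).toList = "five".toList := by
      rw [slice_toList, PySem.List.slice_some_none, hclamp, ← hs, List.drop_left]
    have hidx : line.toList.length - 4 = s.length := by omega
    have hget : PySem.Str.pyGet? line (-4) = some 'f' := by
      have h0 := PySem.List.pyGet?_neg_natCast line.toList 4 (by omega) (by omega)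
      have hcast : (-((4:Nat):Int)) = (-4 : Int) := by norm_num
      rw [hcast] at h0
      show PySem.List.pyGet? line.toList (-4) = some 'f'
      rw [h0, hidx, ← hs, List.getElem?_append_right (le_refl _)]
      simp
    have hA : find_digit_forward line (-4) = none := by
      simp only [find_digit_forward, hget]
      rw [if_neg (by decide : ¬ (pvDigits.contains (String.ofList ['f']) = true))]
      apply findA_none
      intro p hp
      fin_cases hp
      · exact check_false_pre line "one" (-4) (by decide) ⟨by omega, by omega⟩ (by decide) (by rw [htail]; decide)
      · exact check_false_pre line "two" (-4) (by decide) ⟨by omega, by omega⟩ (by decide) (by rw [htail]; decide)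
      · exact check_false_pre line "three" (-4) (by decide) ⟨by omega, by omega⟩ (by decide) (by rw [htail]; decide)
      · exact check_false_zero line "four" (-4) (by decide) (by decide)
      · exact check_false_zero line "five" (-4) (by decide) (by decide)
      · exact check_false_pre line "six" (-4) (by decide) ⟨by omega, by omega⟩ (by decide) (by rw [htail]; decide)
      · exact check_false_pre line "seven" (-4) (by decide) ⟨by omega, by omega⟩ (by decide) (by rw [htail]; decide)
      · exact check_false_pre line "eight" (-4) (by decide) ⟨by omega, by omega⟩ (by decide) (by rw [htail]; decide)
      · exact check_false_zero line "nine" (-4) (by decide) (by decide)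
    have hB : find_digit_forward_alt line (-4) = some "5" := by
      simp only [find_digit_forward_alt, hget]
      rw [if_neg (by decide), htail]
      decide
    rw [hA, hB]
    simp
  · -- w = "six"
    have hk : pos = -3 := by simpa using hpos
    subst hk
    have hlen : line.toList.length = s.length + 3 := by rw [← hs]; simp
    have hclamp : PySem.List.clampIdx line.toList.length (-3) = s.length := by
      simp only [PySem.List.clampIdx]; split_ifs <;> omega
    have htail : (PySem.Str.slice line (some (-3)) none).toList = "six".toList := by
      rw [slice_toList, PySem.List.slice_some_none, hclamp, ← hs, List.drop_left]
    have hidx : line.toList.length - 3 = s.length := by omega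
    have hget : PySem.Str.pyGet? line (-3) = some 's' := by
      have h0 := PySem.List.pyGet?_neg_natCast line.toList 3 (by omega) (by omega)
      have hcast : (-((3:Nat):Int)) = (-3 : Int) := by norm_num
      rw [hcast] at h0
      show PySem.List.pyGet? line.toList (-3) = some 's'
      rw [h0, hidx, ← hs, List.getElem?_append_right (le_refl _)]
      simp
    have hA : find_digit_forward line (-3) = none := by
      simp only [find_digit_forward, hget]
      rw [if_neg (by decide : ¬ (pvDigits.contains (String.ofList ['s']) = true))]
      apply findA_none
      intro p hp
      fin_cases hp
      · exact check_false_zero line "one" (-3) (by decide) (by decide)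
      · exact check_false_zero line "two" (-3) (by decide) (by decide)
      · exact check_false_pre line "three" (-3) (by decide) ⟨by omega, by omega⟩ (by decide) (by rw [htail]; decide)
      · exact check_false_pre line "four" (-3) (by decide) ⟨by omega, by omega⟩ (by decide) (by rw [htail]; decide)
      · exact check_false_pre line "five" (-3) (by decide) ⟨by omega, by omega⟩ (by decide) (by rw [htail]; decide)
      · exact check_false_zero line "six" (-3) (by decide) (by decide)
      · exact check_false_pre line "seven" (-3) (by decide) ⟨by omega, by omega⟩ (by decide) (by rw [htail]; decide)
      · exact check_false_pre line "eight" (-3) (by decide) ⟨by omega, by omega⟩ (by decide) (by rw [htail]; decide)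
      · exact check_false_pre line "nine" (-3) (by decide) ⟨by omega, by omega⟩ (by decide) (by rw [htail]; decide)
    have hB : find_digit_forward_alt line (-3) = some "6" := by
      simp only [find_digit_forward_alt, hget]
      rw [if_neg (by decide), htail]
      decide
    rw [hA, hB]
    simp
  · -- w = "seven"
    have hk : pos = -5 := by simpa using hpos
    subst hk
    have hlen : line.toList.length = s.length + 5 := by rw [← hs]; simp
    have hclamp : PySem.List.clampIdx line.toList.length (-5) = s.length := by
      simp only [PySem.List.clampIdx]; split_ifs <;> omega
    have htail : (PySem.Str.slice line (some (-5)) none).toList = "seven".toList := by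
      rw [slice_toList, PySem.List.slice_some_none, hclamp, ← hs, List.drop_left]
    have hidx : line.toList.length - 5 = s.length := by omega
    have hget : PySem.Str.pyGet? line (-5) = some 's' := by
      have h0 := PySem.List.pyGet?_neg_natCast line.toList 5 (by omega) (by omega)
      have hcast : (-((5:Nat):Int)) = (-5 : Int) := by norm_num
      rw [hcast] at h0
      show PySem.List.pyGet? line.toList (-5) = some 's'
      rw [h0, hidx, ← hs, List.getElem?_append_right (le_refl _)]
      simp
    have hA : find_digit_forward line (-5) = none := by
      simp only [find_digit_forward, hget]
      rw [if_neg (by decide : ¬ (pvDigits.contains (String.ofList ['s']) = true))]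
      apply findA_none
      intro p hp
      fin_cases hp
      · exact check_false_pre line "one" (-5) (by decide) ⟨by omega, by omega⟩ (by decide) (by rw [htail]; decide)
      · exact check_false_pre line "two" (-5) (by decide) ⟨by omega, by omega⟩ (by decide) (by rw [htail]; decide)
      · exact check_false_zero line "three" (-5) (by decide) (by decide)
      · exact check_false_pre line "four" (-5) (by decide) ⟨by omega, by omega⟩ (by decide) (by rw [htail]; decide)
      · exact check_false_pre line "five" (-5) (by decide) ⟨by omega, by omega⟩ (by decide) (by rw [htail]; decide)
      · exact check_false_pre line "six" (-5) (by decide) ⟨by omega, by omega⟩ (by decide) (by rw [htail]; decide)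
      · exact check_false_zero line "seven" (-5) (by decide) (by decide)
      · exact check_false_zero line "eight" (-5) (by decide) (by decide)
      · exact check_false_pre line "nine" (-5) (by decide) ⟨by omega, by omega⟩ (by decide) (by rw [htail]; decide)
    have hB : find_digit_forward_alt line (-5) = some "7" := by
      simp only [find_digit_forward_alt, hget]
      rw [if_neg (by decide), htail]
      decide
    rw [hA, hB]
    simp
  · -- w = "eight"
    have hk : pos = -5 := by simpa using hpos
    subst hk
    have hlen : line.toList.length = s.length + 5 := by rw [← hs]; simp
    have hclamp : PySem.List.clampIdx line.toList.length (-5) = s.length := by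
      simp only [PySem.List.clampIdx]; split_ifs <;> omega
    have htail : (PySem.Str.slice line (some (-5)) none).toList = "eight".toList := by
      rw [slice_toList, PySem.List.slice_some_none, hclamp, ← hs, List.drop_left]
    have hidx : line.toList.length - 5 = s.length := by omega
    have hget : PySem.Str.pyGet? line (-5) = some 'e' := by
      have h0 := PySem.List.pyGet?_neg_natCast line.toList 5 (by omega) (by omega)
      have hcast : (-((5:Nat):Int)) = (-5 : Int) := by norm_num
      rw [hcast] at h0
      show PySem.List.pyGet? line.toList (-5) = some 'e'
      rw [h0, hidx, ← hs, List.getElem?_append_right (le_refl _)]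
      simp
    have hA : find_digit_forward line (-5) = none := by
      simp only [find_digit_forward, hget]
      rw [if_neg (by decide : ¬ (pvDigits.contains (String.ofList ['e']) = true))]
      apply findA_none
      intro p hp
      fin_cases hp
      · exact check_false_pre line "one" (-5) (by decide) ⟨by omega, by omega⟩ (by decide) (by rw [htail]; decide)
      · exact check_false_pre line "two" (-5) (by decide) ⟨by omega, by omega⟩ (by decide) (by rw [htail]; decide)
      · exact check_false_zero line "three" (-5) (by decide) (by decide)
      · exact check_false_pre line "four" (-5) (by decide) ⟨by omega, by omega⟩ (by decide) (by rw [htail]; decide)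
      · exact check_false_pre line "five" (-5) (by decide) ⟨by omega, by omega⟩ (by decide) (by rw [htail]; decide)
      · exact check_false_pre line "six" (-5) (by decide) ⟨by omega, by omega⟩ (by decide) (by rw [htail]; decide)
      · exact check_false_zero line "seven" (-5) (by decide) (by decide)
      · exact check_false_zero line "eight" (-5) (by decide) (by decide)
      · exact check_false_pre line "nine" (-5) (by decide) ⟨by omega, by omega⟩ (by decide) (by rw [htail]; decide)
    have hB : find_digit_forward_alt line (-5) = some "8" := by
      simp only [find_digit_forward_alt, hget]
      rw [if_neg (by decide), htail]
      decide
    rw [hA, hB]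
    simp
  · -- w = "nine"
    have hk : pos = -4 := by simpa using hpos
    subst hk
    have hlen : line.toList.length = s.length + 4 := by rw [← hs]; simp
    have hclamp : PySem.List.clampIdx line.toList.length (-4) = s.length := by
      simp only [PySem.List.clampIdx]; split_ifs <;> omega
    have htail : (PySem.Str.slice line (some (-4)) none).toList = "nine".toList := by
      rw [slice_toList, PySem.List.slice_some_none, hclamp, ← hs, List.drop_left]
    have hidx : line.toList.length - 4 = s.length := by omega
    have hget : PySem.Str.pyGet? line (-4) = some 'n' := by
      have h0 := PySem.List.pyGet?_neg_natCast line.toList 4 (by omega) (by omega)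
      have hcast : (-((4:Nat):Int)) = (-4 : Int) := by norm_num
      rw [hcast] at h0
      show PySem.List.pyGet? line.toList (-4) = some 'n'
      rw [h0, hidx, ← hs, List.getElem?_append_right (le_refl _)]
      simp
    have hA : find_digit_forward line (-4) = none := by
      simp only [find_digit_forward, hget]
      rw [if_neg (by decide : ¬ (pvDigits.contains (String.ofList ['n']) = true))]
      apply findA_none
      intro p hp
      fin_cases hp
      · exact check_false_pre line "one" (-4) (by decide) ⟨by omega, by omega⟩ (by decide) (by rw [htail]; decide)
      · exact check_false_pre line "two" (-4) (by decide) ⟨by omega, by omega⟩ (by decide) (by rw [htail]; decide)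
      · exact check_false_pre line "three" (-4) (by decide) ⟨by omega, by omega⟩ (by decide) (by rw [htail]; decide)
      · exact check_false_zero line "four" (-4) (by decide) (by decide)
      · exact check_false_zero line "five" (-4) (by decide) (by decide)
      · exact check_false_pre line "six" (-4) (by decide) ⟨by omega, by omega⟩ (by decide) (by rw [htail]; decide)
      · exact check_false_pre line "seven" (-4) (by decide) ⟨by omega, by omega⟩ (by decide) (by rw [htail]; decide)
      · exact check_false_pre line "eight" (-4) (by decide) ⟨by omega, by omega⟩ (by decide) (by rw [htail]; decide)
      · exact check_false_zero line "nine" (-4) (by decide) (by decide)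
    have hB : find_digit_forward_alt line (-4) = some "9" := by
      simp only [find_digit_forward_alt, hget]
      rw [if_neg (by decide), htail]
      decide
    rw [hA, hB]
    simp

-- ===== VERDICT =====
theorem find_digit_forward_spec : Claim_unchanged_find_digit_forward := by
  intro line pos _hdom hpre
  unfold Spec_find_digit_forward
  intro hnD
  exact (main_eq line pos hpre hnD).symm ▸ rfl

theorem find_digit_forward_changed : Claim_changed_find_digit_forward := by
  unfold Claim_changed_find_digit_forward; decide

theorem find_digit_forward_tight : Claim_exact_find_digit_forward := by
  intro line pos _hdom hpre hD
  exact main_ne line pos hpre hD
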